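-- pv_equiv track=rewrite | github.com/jaiz25/IS211_Assignment14 | recursion.py | compareTo
-- ===== SOURCE A (Python) =====
-- def compareTo(s1, s2):
--     """String comparison using a recursive function."""
--
--     if s1 == '' or s2 == '':
--         return 0
--     if len(s1) < len(s2):
--         return compareTo(s1[1:], s2) - 1
--     if len(s1) > len(s2):
--         return 1 + compareTo(s1, s2[1:])
--     if len(s1) == len(s2):
--         return 0 + compareTo(s1[1:], s2[1:])
-- ===== SOURCE B (Python) =====
-- def compareTo(s1, s2):
--     """Closed-form equivalent: -len(s1) if s1 shorter, len(s2) if longer, else 0."""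
--     n1, n2 = len(s1), len(s2)
--     if n1 < n2:
--         return -n1
--     if n2 < n1:
--         return n2
--     return 0
-- ===== Notes on version B (the rewrite author's own statement) =====
-- stated objective: faster
-- what changed: Replaced the recursion with O(n^2) slicing by a closed-form conditional on the two lengths (-len(s1) if shorter, len(s2) if longer, else 0).
import Mathlib
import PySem

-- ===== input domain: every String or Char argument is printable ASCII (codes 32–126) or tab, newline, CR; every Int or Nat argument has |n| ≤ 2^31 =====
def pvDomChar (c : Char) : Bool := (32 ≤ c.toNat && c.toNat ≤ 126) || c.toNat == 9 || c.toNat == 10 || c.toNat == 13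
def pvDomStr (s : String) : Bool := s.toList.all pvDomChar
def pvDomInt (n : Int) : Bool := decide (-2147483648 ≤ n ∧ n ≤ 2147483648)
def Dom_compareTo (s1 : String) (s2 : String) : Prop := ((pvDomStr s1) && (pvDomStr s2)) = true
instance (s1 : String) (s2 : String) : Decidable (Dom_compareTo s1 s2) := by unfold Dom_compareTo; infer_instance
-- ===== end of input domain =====

-- B replaces A's O(n^2) slicing recursion by a closed-form conditional on the two lengths.

-- ===== PORT A =====
-- recursion on the character lists; s[1:] on a nonempty string is exactly List.tail
def compareToGo (l1 l2 : List Char) : Int :=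
  if l1 = [] ∨ l2 = [] then 0
  else if l1.length < l2.length then compareToGo l1.tail l2 - 1
  else if l1.length > l2.length then 1 + compareToGo l1 (l2.tail)
  else 0 + compareToGo l1.tail l2.tail
termination_by l1.length + l2.length
decreasing_by
  all_goals
    rcases l1 with _ | ⟨a, l1⟩ <;> rcases l2 with _ | ⟨b, l2⟩ <;> simp_all <;> omega

def compareTo (s1 : String) (s2 : String) : Int := compareToGo s1.toList s2.toList

-- ===== PORT B =====
def compareTo_alt (s1 : String) (s2 : String) : Int :=
  let n1 : Int := s1.toList.length
  let n2 : Int := s2.toList.length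
  if n1 < n2 then -n1
  else if n2 < n1 then n2
  else 0

-- ===== PRECONDITION & SPEC =====
def Spec_compareTo (s1 : String) (s2 : String) (out : Int) : Prop := out = compareTo_alt s1 s2
instance (s1 : String) (s2 : String) (out : Int) : Decidable (Spec_compareTo s1 s2 out) := by unfold Spec_compareTo; infer_instance

-- ===== CLAIM (what is proved, stated in full; the proofs are below) =====
def Claim_equal_compareTo : Prop := ∀ (s1 : String) (s2 : String), Dom_compareTo s1 s2 → Spec_compareTo s1 s2 (compareTo s1 s2)

-- ===== LEMMAS AND PROOFS =====
theorem compareToGo_closed (l1 l2 : List Char) :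
    compareToGo l1 l2 =
      if (l1.length : Int) < l2.length then -(l1.length : Int)
      else if (l2.length : Int) < l1.length then (l2.length : Int)
      else 0 := by
  fun_induction compareToGo l1 l2 with
  | case1 l1 l2 h =>
      rcases h with h | h <;> subst h <;> simp
  | case2 l1 l2 hne hlt ih =>
      push Not at hne
      obtain ⟨h1, h2⟩ := hne
      rcases l1 with _ | ⟨a, t1⟩
      · simp at h1
      · simp only [List.tail_cons] at ih
        simp [ih, List.length_cons] at *
        split_ifs <;> push_cast <;> omega
  | case3 l1 l2 hne hlt hgt ih =>
      push Not at hne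
      obtain ⟨h1, h2⟩ := hne
      rcases l2 with _ | ⟨b, t2⟩
      · simp at h2
      · simp only [List.tail_cons] at ih
        simp [ih, List.length_cons] at *
        split_ifs <;> push_cast <;> omega
  | case4 l1 l2 hne hlt hgt ih =>
      push Not at hne
      obtain ⟨h1, h2⟩ := hne
      rcases l1 with _ | ⟨a, t1⟩
      · simp at h1
      rcases l2 with _ | ⟨b, t2⟩
      · simp at h2
      simp only [List.tail_cons] at ih
      simp [ih, List.length_cons] at *
      split_ifs <;> push_cast <;> omega

-- ===== VERDICT (by name: the statement is the Claim_ definition above) =====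
theorem compareTo_spec : Claim_equal_compareTo := by
  intro s1 s2 _
  unfold Spec_compareTo compareTo compareTo_alt
  rw [compareToGo_closed]
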